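-- pv_equiv track=rewrite | github.com/joooooonson/LOGICnPROG_2017_Fall | 2dchallenge/joonson_w0410150_702_boxOrDiamond.py | drawing_box
-- ===== SOURCE A (Python) =====
-- def drawing_box(size, character):
--     side = size + size -1
--     drawing = []
--     for i in range(side):
--         line = [" "] * side
--         for j in range(side):
--             if i == 0 or i == side-1:
--                 line[j] = character
--             else:
--                 if j==0 or j==side-1:
--                     line[j]=character
--         drawing.append(line)
--     return drawing
-- ===== SOURCE B (Python) =====
-- def drawing_box(size, character):
--     side = 2 * size - 1
--     rows = []
--     for i in range(side):
--         if i == 0 or i == side - 1: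
--             rows.append([character] * side)
--         else:
--             rows.append([character] + [" "] * (side - 2) + [character])
--     return rows
-- ===== Notes on version B (the rewrite author's own statement) =====
-- stated objective: simpler
-- what changed: B has no inner column loop and no in-place cell mutation: each row is classified once as border or interior and built directly by list repetition/concatenation.
import Mathlib
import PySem

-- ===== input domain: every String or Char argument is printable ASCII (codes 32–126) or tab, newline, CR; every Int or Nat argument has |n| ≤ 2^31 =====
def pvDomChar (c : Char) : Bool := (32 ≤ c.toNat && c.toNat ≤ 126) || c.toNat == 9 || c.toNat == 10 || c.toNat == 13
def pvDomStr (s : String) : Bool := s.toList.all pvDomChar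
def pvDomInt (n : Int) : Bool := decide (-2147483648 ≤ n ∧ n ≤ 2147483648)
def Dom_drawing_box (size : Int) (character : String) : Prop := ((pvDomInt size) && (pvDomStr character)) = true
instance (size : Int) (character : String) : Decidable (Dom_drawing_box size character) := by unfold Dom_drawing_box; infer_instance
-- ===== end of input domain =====

-- B builds each row directly (border row = character repeated, interior = character + blanks + character), replacing A's per-cell inner loop with in-place mutation; objective: simpler.


-- ===== PORT A =====
def drawing_box (size : Int) (character : String) : List (List String) :=
  let side := size + size - 1
  (PySem.List.pyRange 0 side 1).foldl (fun drawing i =>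
    let line := List.replicate side.toNat " "
    let line := (PySem.List.pyRange 0 side 1).foldl (fun line j =>
      if i = 0 ∨ i = side - 1 then line.set j.toNat character
      else if j = 0 ∨ j = side - 1 then line.set j.toNat character
      else line) line
    drawing ++ [line]) []

-- ===== PORT B =====
def drawing_box_alt (size : Int) (character : String) : List (List String) :=
  let side := 2 * size - 1
  (PySem.List.pyRange 0 side 1).foldl (fun rows i =>
    rows ++ [if i = 0 ∨ i = side - 1 then List.replicate side.toNat character
             else [character] ++ List.replicate (side - 2).toNat " " ++ [character]]) []

-- ===== PRECONDITION & SPEC =====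
def Spec_drawing_box (size : Int) (character : String) (out : List (List String)) : Prop := out = drawing_box_alt size character
instance (size : Int) (character : String) (out : List (List String)) : Decidable (Spec_drawing_box size character out) := by unfold Spec_drawing_box; infer_instance

-- ===== CLAIM (what is proved, stated in full; the proofs are below) =====
def Claim_equal_drawing_box : Prop := ∀ (size : Int) (character : String), Dom_drawing_box size character → Spec_drawing_box size character (drawing_box size character)

-- ===== LEMMAS AND PROOFS =====

-- the conditional-set fold preserves length
theorem pv_fold_set_length (q : Nat → Prop) [DecidablePred q] (c : String) (m : Nat) :
    ∀ (l : List String), ((List.range m).foldl (fun l j => if q j then l.set j c else l) l).length = l.length := by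
  induction m with
  | zero => intro l; simp
  | succ m ih =>
      intro l
      rw [List.range_succ, List.foldl_append]
      simp only [List.foldl_cons, List.foldl_nil]
      split_ifs <;> simp [ih]

-- pointwise value of the conditional-set fold
theorem pv_fold_set_getElem? (q : Nat → Prop) [DecidablePred q] (c : String) (m : Nat) :
    ∀ (l : List String) (k : Nat),
      ((List.range m).foldl (fun l j => if q j then l.set j c else l) l)[k]? =
        if q k ∧ k < m ∧ k < l.length then some c else l[k]? := by
  induction m with
  | zero => intro l k; simp
  | succ m ih =>
      intro l k
      rw [List.range_succ, List.foldl_append]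
      simp only [List.foldl_cons, List.foldl_nil]
      have hiff : k ≠ m → ((q k ∧ k < m ∧ k < l.length) ↔ (q k ∧ k < m + 1 ∧ k < l.length)) := by
        intro hk; constructor <;> rintro ⟨a, b, c'⟩ <;> exact ⟨a, by omega, c'⟩
      by_cases hqm : q m
      · rw [if_pos hqm, List.getElem?_set, pv_fold_set_length q c m l, ih]
        by_cases hk : k = m
        · subst hk
          by_cases hkl : k < l.length <;> simp [hkl, hqm]
        · rw [if_neg (show ¬ (m = k) from fun h => hk h.symm)]; simp only [hiff hk]
      · rw [if_neg hqm, ih]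
        by_cases hk : k = m
        · subst hk; simp [hqm]
        · simp only [hiff hk]

-- border row: setting every cell of the blank row yields a full row of c
theorem pv_row_border (n : Nat) (c : String) :
    (List.range n).foldl (fun l k => l.set k c) (List.replicate n " ") = List.replicate n c := by
  have hf : (fun (l : List String) (k : Nat) => l.set k c)
      = (fun l k => if (fun (_ : Nat) => True) k then l.set k c else l) := by
    funext l k; simp
  rw [hf]
  apply List.ext_getElem?
  intro k
  rw [pv_fold_set_getElem? (fun _ => True) c n]
  by_cases hk : k < n <;> simp [hk]

-- interior row value, pointwise
theorem pv_interior_getElem? (n : Nat) (hn : 2 ≤ n) (c : String) (k : Nat) :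
    ([c] ++ List.replicate (n - 2) " " ++ [c])[k]? =
      if k < n then (if k = 0 ∨ k = n - 1 then some c else some " ") else none := by
  rcases k with _ | k
  · simp; omega
  · simp only [List.cons_append, List.nil_append, List.getElem?_cons_succ]
    by_cases h1 : k < n - 2
    · rw [List.getElem?_append_left (by simp; omega), List.getElem?_replicate]
      simp only [h1, if_pos h1]
      have : k + 1 < n := by omega
      simp only [if_pos this]
      have hq : ¬ (k + 1 = 0 ∨ k + 1 = n - 1) := by omega
      simp only [if_neg hq, List.getElem?_replicate, if_pos h1]; simp
    · by_cases h2 : k = n - 2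
      · rw [List.getElem?_append_right (by simp; omega)]
        have : k - (List.replicate (n - 2) " ").length = 0 := by simp; omega
        rw [this]
        have h3 : k + 1 < n := by omega
        have h4 : k + 1 = 0 ∨ k + 1 = n - 1 := by omega
        simp only [if_pos h3, if_pos h4, List.getElem?_cons_zero]
      · have hlen : ((List.replicate (n - 2) " " : List String) ++ [c]).length = n - 1 := by simp; omega
        rw [List.getElem?_eq_none (by rw [hlen]; omega)]
        have : ¬ (k + 1 < n) := by omega
        simp [this]

-- each row of A equals the corresponding row of B
theorem pv_row_eq (side i : Int) (c : String) (h0 : 0 ≤ i) (h1 : i < side) :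
    (PySem.List.pyRange 0 side 1).foldl (fun line j =>
        if i = 0 ∨ i = side - 1 then line.set j.toNat c
        else if j = 0 ∨ j = side - 1 then line.set j.toNat c
        else line) (List.replicate side.toNat " ")
      = (if i = 0 ∨ i = side - 1 then List.replicate side.toNat c
         else [c] ++ List.replicate (side - 2).toNat " " ++ [c]) := by
  rw [PySem.List.pyRange_one]
  simp only [List.foldl_map, zero_add, sub_zero, Int.toNat_natCast]
  by_cases hb : i = 0 ∨ i = side - 1
  · simp only [if_pos hb]
    exact pv_row_border side.toNat c
  · simp only [if_neg hb]
    have hside : 3 ≤ side := by omega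
    have hn : 3 ≤ side.toNat := by omega
    apply List.ext_getElem?
    intro k
    rw [pv_fold_set_getElem? (fun k : Nat => (k : Int) = 0 ∨ (k : Int) = side - 1) c side.toNat]
    have h2 : (side - 2).toNat = side.toNat - 2 := by omega
    rw [h2]
    rw [pv_interior_getElem? side.toNat (by omega) c k]
    simp only [List.length_replicate, List.getElem?_replicate]
    by_cases hk : k < side.toNat
    · simp only [hk, if_pos hk, and_true]
      by_cases hq : (k : Int) = 0 ∨ (k : Int) = side - 1
      · have : k = 0 ∨ k = side.toNat - 1 := by omega
        simp [hq, this]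
        all_goals (intros; exfalso; omega)
      · have : ¬ (k = 0 ∨ k = side.toNat - 1) := by omega
        simp [hq, this]
        all_goals (intros; exfalso; omega)
    · simp [hk]

-- ===== VERDICT (by name: the statement is the Claim_ definition above) =====
theorem drawing_box_spec : Claim_equal_drawing_box := by
  intro size character _
  unfold Spec_drawing_box drawing_box drawing_box_alt
  dsimp only
  have hside : size + size - 1 = 2 * size - 1 := by ring
  rw [hside]
  apply PySem.List.foldl_congr_mem
  intro acc i hi
  rcases (PySem.List.mem_pyRange_one).1 hi with ⟨h0, h1⟩
  rw [pv_row_eq (2 * size - 1) i character h0 h1]
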